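-- pv_equiv track=rewrite | github.com/jorgeariasm/Testig_y_Mantenimiento_de_Aplicaciones | utils.py | obtener_frecuencias_y_vocabulario
-- ===== SOURCE A (Python) =====
-- def obtener_frecuencias_y_vocabulario(dataset: list) -> tuple:
--     """
--     Calcula las frecuencias de términos y el vocabulario a partir de un dataset.
--
--     Parámetros:
--     - dataset (list): Lista de diccionarios representando el dataset.
--
--     Devuelve:
--     - tuple: Tupla que contiene la lista de frecuencias de términos y el vocabulario.
--     """
--     frecuencias = []
--     vocabulario = set()
--
--     for tweet in dataset:
--         frecuencia_tweet = {}
--         palabras = tweet['text'].split()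
--
--         for palabra in palabras:
--             if palabra not in frecuencia_tweet:
--                 frecuencia_tweet[palabra] = 1
--             else:
--                 frecuencia_tweet[palabra] += 1
--
--         frecuencias.append(frecuencia_tweet)
--         vocabulario.update(palabras)
--
--     vocabulario = sorted(list(vocabulario))
--
--     return frecuencias, vocabulario
-- ===== SOURCE B (Python) =====
-- def obtener_frecuencias_y_vocabulario(dataset: list) -> tuple:
--     listas = [tweet['text'].split() for tweet in dataset]
--     frecuencias = []
--     for palabras in listas:
--         vistos = []
--         for w in palabras:
--             if w not in vistos:
--                 vistos.append(w)
--         frecuencias.append({w: palabras.count(w) for w in vistos})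
--     vocabulario = sorted(set(w for palabras in listas for w in palabras))
--     return frecuencias, vocabulario
-- ===== Notes on version B (the rewrite author's own statement) =====
-- stated objective: alternative
-- what changed: Instead of incrementing counts in a dict while also maintaining a parallel vocabulary set, B first splits all tweets, builds each frequency table by deduplicating the word list in first-occurrence order and counting each distinct word with list.count, and derives the vocabulary afterwards as the sorted set of the flattened word lists.
import Mathlib
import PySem

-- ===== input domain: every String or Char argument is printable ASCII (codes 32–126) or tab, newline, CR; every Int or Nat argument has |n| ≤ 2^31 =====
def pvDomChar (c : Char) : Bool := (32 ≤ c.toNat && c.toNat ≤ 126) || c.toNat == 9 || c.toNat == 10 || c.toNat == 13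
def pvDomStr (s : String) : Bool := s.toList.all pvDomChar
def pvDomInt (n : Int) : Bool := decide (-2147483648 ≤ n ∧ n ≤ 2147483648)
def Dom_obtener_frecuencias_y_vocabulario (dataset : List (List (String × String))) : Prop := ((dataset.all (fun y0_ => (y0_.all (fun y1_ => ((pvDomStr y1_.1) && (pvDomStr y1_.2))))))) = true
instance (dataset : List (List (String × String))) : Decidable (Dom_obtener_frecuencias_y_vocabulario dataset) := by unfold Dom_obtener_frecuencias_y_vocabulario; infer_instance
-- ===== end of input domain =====

-- ===== PORT A =====
-- B counts each tweet by deduplicating its word list and rescanning with list.count,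
-- and derives the vocabulary afterwards from the flattened word lists (objective: alternative).
-- In both ports, tweet['text'] is ((PySem.Dict.mk tweet).get? "text"); none (KeyError) is
-- excluded by Pre_, so the .getD "" stand-in is never reached inside Pre_.
def obtener_frecuencias_y_vocabulario (dataset : List (List (String × String))) : (List (List (String × Int))) × List String :=
  let st := dataset.foldl (fun (st : List (List (String × Int)) × PySem.Set String) tweet =>
      let palabras := PySem.Str.split₀ (((PySem.Dict.mk tweet).get? "text").getD "")
      let frecuencia_tweet := palabras.foldl (fun d palabra =>
          if d.contains palabra = false then d.insert palabra 1
          else d.insert palabra (d.getD palabra 0 + 1)) PySem.Dict.empty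
      (st.1 ++ [frecuencia_tweet.items], PySem.Set.update st.2 palabras)) ([], PySem.Set.empty)
  (st.1, PySem.List.sorted st.2 (fun x => x) false)

-- ===== PORT B =====
def obtener_frecuencias_y_vocabulario_alt (dataset : List (List (String × String))) : (List (List (String × Int))) × List String :=
  let listas := dataset.map (fun tweet => PySem.Str.split₀ (((PySem.Dict.mk tweet).get? "text").getD ""))
  let frecuencias := listas.map (fun palabras =>
      let vistos := palabras.foldl (fun (v : List String) w =>
          if v.contains w then v else v ++ [w]) []
      vistos.map (fun w => (w, (PySem.List.count palabras w : Int))))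
  let vocabulario := PySem.List.sorted (PySem.Set.ofList (listas.flatMap (fun palabras => palabras))) (fun x => x) false
  (frecuencias, vocabulario)

-- ===== PRECONDITION & SPEC =====
-- Pre_: every tweet dict has the key 'text' (Python A raises KeyError otherwise).
def Pre_obtener_frecuencias_y_vocabulario (dataset : List (List (String × String))) : Prop :=
  (dataset.all (fun tweet => (PySem.Dict.mk tweet).contains "text")) = true
instance (dataset : List (List (String × String))) : Decidable (Pre_obtener_frecuencias_y_vocabulario dataset) := by unfold Pre_obtener_frecuencias_y_vocabulario; infer_instance

def pvWitness_obtener_frecuencias_y_vocabulario : (List (List (String × String))) :=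
  [[("text", "hola mundo hola")], [("text", "x y"), ("lang", "es")]]

def Spec_obtener_frecuencias_y_vocabulario (dataset : List (List (String × String))) (out : (List (List (String × Int))) × List String) : Prop := out = obtener_frecuencias_y_vocabulario_alt dataset
instance (dataset : List (List (String × String))) (out : (List (List (String × Int))) × List String) : Decidable (Spec_obtener_frecuencias_y_vocabulario dataset out) := by unfold Spec_obtener_frecuencias_y_vocabulario; infer_instance

-- ===== CLAIM (what is proved, stated in full; the proofs are below) =====
def Claim_equal_obtener_frecuencias_y_vocabulario : Prop := ∀ (dataset : List (List (String × String))), Dom_obtener_frecuencias_y_vocabulario dataset → Pre_obtener_frecuencias_y_vocabulario dataset → Spec_obtener_frecuencias_y_vocabulario dataset (obtener_frecuencias_y_vocabulario dataset)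

-- ===== LEMMAS AND PROOFS =====

-- A's branching counting step is the insert/getD counting step.
theorem pv_step_eq (d : PySem.Dict String Int) (w : String) :
    (if d.contains w = false then d.insert w 1 else d.insert w (d.getD w 0 + 1))
      = d.insert w (d.getD w 0 + 1) := by
  by_cases h : d.contains w = false
  · rw [if_pos h, PySem.Dict.getD_of_not_contains d 0 h, zero_add]
  · rw [if_neg h]

-- A's per-tweet dict, as items: first-occurrence keys paired with their counts — which is B's table.
theorem pv_items_eq (ws : List String) :
    (ws.foldl (fun d palabra =>
        if d.contains palabra = false then d.insert palabra 1
        else d.insert palabra (d.getD palabra 0 + 1)) (PySem.Dict.empty : PySem.Dict String Int)).items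
      = (ws.foldl (fun (v : List String) w => if v.contains w then v else v ++ [w]) []).map
          (fun w => (w, (PySem.List.count ws w : Int))) := by
  have hset : ws.foldl (fun (v : List String) w => if v.contains w then v else v ++ [w]) []
      = PySem.Set.ofList ws := by
    rw [PySem.Set.ofList_eq_foldl]
    rfl
  simp only [pv_step_eq, PySem.Dict.foldl_insert_getD_add_one_eq_counter,
    PySem.Dict.items_counter, hset, PySem.List.count_eq]

-- A's vocabulary fold over word lists = the set of the flattened word lists.
theorem pv_vocab_fold (ls : List (List String)) (s : PySem.Set String) :
    ls.foldl (fun s l => PySem.Set.update s l) s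
      = (ls.flatMap (fun l => l)).foldl PySem.Set.add s := by
  induction ls generalizing s with
  | nil => rfl
  | cons l ls ih =>
    rw [List.foldl_cons, List.flatMap_cons, List.foldl_append, ih]
    rfl

theorem pv_vocab_fold' (ls : List (List String)) :
    ls.foldl (fun s l => PySem.Set.update s l) PySem.Set.empty
      = PySem.Set.ofList (ls.flatMap (fun l => l)) := by
  rw [PySem.Set.ofList_eq_foldl]
  exact pv_vocab_fold ls PySem.Set.empty

-- A's fold with its two accumulators, characterised in one induction.
theorem pv_foldA (ds : List (List (String × String))) (acc : List (List (String × Int))) (s : PySem.Set String) :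
    ds.foldl (fun st tweet =>
        (st.1 ++ [((PySem.Str.split₀ (((PySem.Dict.mk tweet).get? "text").getD "")).foldl (fun d palabra =>
            if d.contains palabra = false then d.insert palabra 1
            else d.insert palabra (d.getD palabra 0 + 1)) PySem.Dict.empty).items],
         PySem.Set.update st.2 (PySem.Str.split₀ (((PySem.Dict.mk tweet).get? "text").getD "")))) (acc, s)
      = (acc ++ ds.map (fun tweet => ((PySem.Str.split₀ (((PySem.Dict.mk tweet).get? "text").getD "")).foldl (fun d palabra =>
            if d.contains palabra = false then d.insert palabra 1
            else d.insert palabra (d.getD palabra 0 + 1)) PySem.Dict.empty).items),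
         ds.foldl (fun s t => PySem.Set.update s (PySem.Str.split₀ (((PySem.Dict.mk t).get? "text").getD ""))) s) := by
  induction ds generalizing acc s with
  | nil => simp
  | cons t ds ih => simp [ih]

-- ===== VERDICT (by name: the statement is the Claim_ definition above) =====
theorem obtener_frecuencias_y_vocabulario_spec : Claim_equal_obtener_frecuencias_y_vocabulario := by
  intro ds _ _
  unfold Spec_obtener_frecuencias_y_vocabulario
  simp only [obtener_frecuencias_y_vocabulario, obtener_frecuencias_y_vocabulario_alt]
  rw [pv_foldA]
  refine Prod.ext ?_ ?_
  · simp only [List.nil_append, List.map_map]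
    exact List.map_congr_left (fun t _ => pv_items_eq _)
  · have : ds.foldl (fun s t => PySem.Set.update s (PySem.Str.split₀ (((PySem.Dict.mk t).get? "text").getD ""))) PySem.Set.empty
        = (ds.map (fun t => PySem.Str.split₀ (((PySem.Dict.mk t).get? "text").getD ""))).foldl
            (fun s l => PySem.Set.update s l) PySem.Set.empty := by
      rw [List.foldl_map]
    rw [this, pv_vocab_fold']
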